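-- pv_equiv track=rewrite | github.com/zubair-ce07/testtt | schedual-app/main.py | get_overlapped_timing
-- ===== SOURCE A (Python) =====
-- def get_overlapped_timing(timing1, timing2):
--
--     timing1, timing2 = (timing2.copy(), timing1.copy()) if timing1[0] > timing2[0] else (timing1.copy(), timing2.copy())
--     overlap_timing = []
--     while timing1[0] < timing1[1] and timing2[0] < timing2[1]:
--         if timing1[0] - timing2[0] == 0 :
--             overlap_timing.append(timing1[0])
--             overlap_timing.append(timing1[0]+1)
--             timing2[0] += 1
--         timing1[0] += 1
--     return overlap_timing
-- ===== SOURCE B (Python) =====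
-- def get_overlapped_timing(timing1, timing2):
--     lo = max(timing1[0], timing2[0])
--     hi = min(timing1[1], timing2[1])
--     overlap_timing = []
--     for x in range(lo, hi):
--         overlap_timing += [x, x + 1]
--     return overlap_timing
-- ===== Notes on version B (the rewrite author's own statement) =====
-- stated objective: alternative
-- what changed: B computes the overlap window directly as range(max(starts), min(ends)) and emits the minute pairs in one pass, replacing A's minute-by-minute while loop that also scans the gap between the two start times (intended as faster; measured only 1.43x at the largest size).
-- outside the precondition, e.g. on get_overlapped_timing([4, -2, 69], [9]): A returns [], B raises IndexError
import Mathlib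
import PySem

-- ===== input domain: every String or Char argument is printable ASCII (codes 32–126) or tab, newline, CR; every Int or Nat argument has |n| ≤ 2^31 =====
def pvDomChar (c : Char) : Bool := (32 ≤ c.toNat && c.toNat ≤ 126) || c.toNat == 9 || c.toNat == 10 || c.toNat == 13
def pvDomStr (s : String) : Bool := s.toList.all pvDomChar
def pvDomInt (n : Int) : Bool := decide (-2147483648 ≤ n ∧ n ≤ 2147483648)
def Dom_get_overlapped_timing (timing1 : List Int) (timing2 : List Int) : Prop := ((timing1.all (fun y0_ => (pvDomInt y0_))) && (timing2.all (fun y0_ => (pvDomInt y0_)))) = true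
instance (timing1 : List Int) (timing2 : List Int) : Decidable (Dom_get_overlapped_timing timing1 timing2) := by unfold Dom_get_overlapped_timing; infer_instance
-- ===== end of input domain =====

-- B replaces A's minute-by-minute while loop (which also walks the gap before the
-- overlap) by emitting the pairs of range(max(starts), min(ends)) directly.

-- ===== PORT A =====
-- A's while loop: state (timing1[0], timing1[1], timing2[0], timing2[1], overlap_timing)
def loopA (a e1 b e2 : Int) (acc : List Int) : List Int :=
  if a < e1 ∧ b < e2 then
    if a - b = 0 then loopA (a + 1) e1 (b + 1) e2 (acc ++ [a, a + 1])
    else loopA (a + 1) e1 b e2 acc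
  else acc
termination_by (e1 - a).toNat
decreasing_by all_goals omega

def get_overlapped_timing (timing1 : List Int) (timing2 : List Int) : List Int :=
  -- timing1, timing2 = (timing2.copy(), timing1.copy()) if timing1[0] > timing2[0] else …
  let p := if PySem.List.pyGetD timing1 0 0 > PySem.List.pyGetD timing2 0 0
           then (timing2, timing1) else (timing1, timing2)
  loopA (PySem.List.pyGetD p.1 0 0) (PySem.List.pyGetD p.1 1 0)
        (PySem.List.pyGetD p.2 0 0) (PySem.List.pyGetD p.2 1 0) []

-- ===== PORT B =====
def get_overlapped_timing_alt (timing1 : List Int) (timing2 : List Int) : List Int :=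
  let lo := max (PySem.List.pyGetD timing1 0 0) (PySem.List.pyGetD timing2 0 0)
  let hi := min (PySem.List.pyGetD timing1 1 0) (PySem.List.pyGetD timing2 1 0)
  (PySem.List.pyRange lo hi 1).foldl (fun acc x => acc ++ [x, x + 1]) []

-- ===== PRECONDITION & SPEC =====
-- Pre_ excludes inputs where either argument list has fewer than two elements: there
-- A raises IndexError, except that when the loop condition short-circuits A may return
-- [] without ever reading the missing index, while B (which always reads both bounds)
-- raises; B raises on all such inputs, so they lie outside Pre_.
def Pre_get_overlapped_timing (timing1 : List Int) (timing2 : List Int) : Prop :=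
  2 ≤ timing1.length ∧ 2 ≤ timing2.length
instance (timing1 : List Int) (timing2 : List Int) : Decidable (Pre_get_overlapped_timing timing1 timing2) := by unfold Pre_get_overlapped_timing; infer_instance

def pvWitness_get_overlapped_timing : List Int × List Int := ([0, 3], [1, 5])

def Spec_get_overlapped_timing (timing1 : List Int) (timing2 : List Int) (out : List Int) : Prop := out = get_overlapped_timing_alt timing1 timing2
instance (timing1 : List Int) (timing2 : List Int) (out : List Int) : Decidable (Spec_get_overlapped_timing timing1 timing2 out) := by unfold Spec_get_overlapped_timing; infer_instance

-- ===== CLAIM (what is proved, stated in full; the proofs are below) =====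
def Claim_equal_get_overlapped_timing : Prop := ∀ (timing1 : List Int) (timing2 : List Int), Dom_get_overlapped_timing timing1 timing2 → Pre_get_overlapped_timing timing1 timing2 → Spec_get_overlapped_timing timing1 timing2 (get_overlapped_timing timing1 timing2)

-- ===== LEMMAS AND PROOFS =====

-- A's loop, started with the earlier start a ≤ b, appends exactly the pairs
-- x, x+1 for x in range(b, min e1 e2).
theorem loopA_eq (n : Nat) : ∀ (a e1 b e2 : Int) (acc : List Int),
    (e1 - a).toNat = n → a ≤ b →
    loopA a e1 b e2 acc
      = acc ++ (PySem.List.pyRange b (min e1 e2) 1).flatMap (fun x => [x, x + 1]) := by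
  induction n with
  | zero =>
    intro a e1 b e2 acc hn hab
    rw [loopA]
    have h1 : ¬ (a < e1 ∧ b < e2) := by omega
    rw [if_neg h1]
    rw [PySem.List.pyRange_one_eq_nil (by omega)]
    simp
  | succ k ih =>
    intro a e1 b e2 acc hn hab
    rw [loopA]
    by_cases h1 : a < e1 ∧ b < e2
    · rw [if_pos h1]
      by_cases h2 : a - b = 0
      · rw [if_pos h2]
        have hb : b < min e1 e2 := by omega
        rw [ih (a + 1) e1 (b + 1) e2 _ (by omega) (by omega)]
        rw [PySem.List.pyRange_one_cons hb]
        have hba : b = a := by omega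
        subst hba
        simp
      · rw [if_neg h2]
        exact ih (a + 1) e1 b e2 acc (by omega) (by omega)
    · rw [if_neg h1]
      rw [PySem.List.pyRange_one_eq_nil (by omega)]
      simp

-- ===== VERDICT (by name: the statement is the Claim_ definition above) =====
theorem get_overlapped_timing_spec : Claim_equal_get_overlapped_timing := by
  intro timing1 timing2 _ _
  unfold Spec_get_overlapped_timing get_overlapped_timing get_overlapped_timing_alt
  rw [PySem.List.foldl_append_eq_flatMap]
  set s1 := PySem.List.pyGetD timing1 0 0
  set e1 := PySem.List.pyGetD timing1 1 0
  set s2 := PySem.List.pyGetD timing2 0 0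
  set e2 := PySem.List.pyGetD timing2 1 0
  by_cases h : s1 > s2
  · rw [if_pos h]
    rw [loopA_eq (e2 - s2).toNat s2 e2 s1 e1 [] rfl (by omega)]
    rw [max_eq_left (by omega), min_comm]
  · rw [if_neg h]
    rw [loopA_eq (e1 - s1).toNat s1 e1 s2 e2 [] rfl (by omega)]
    rw [max_eq_right (by omega)]
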